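-- pv_equiv track=rewrite | github.com/dant1k/crypto-summary-core | core.py | group_by_author
-- ===== SOURCE A (Python) =====
-- from typing import List, Dict, Iterable
--
-- def group_by_author(messages: Iterable[Dict]) -> Dict[str, List[str]]:
--     """
--     messages: [{'author':'Quentin','text':'...'}, ...]
--     returns: {'Quentin':[line1, line2], ...}
--     """
--     out: Dict[str, List[str]] = {}
--     for m in messages:
--         a = m.get("author", "unknown")
--         t = (m.get("text") or "").strip()
--         if not t:
--             continue
--         out.setdefault(a, []).append(t)
--     return out
-- ===== SOURCE B (Python) =====
-- def group_by_author(messages):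
--     """Alternative decomposition: one pass extracts filtered (author, text)
--     pairs; the result is then assembled per distinct author (in order of
--     first appearance) by gathering each author's texts from the pair list."""
--     def entry(m):
--         a = m.get("author", "unknown")
--         t = (m.get("text") or "").strip()
--         return (a, t)
--     pairs = [p for p in map(entry, messages) if p[1]]
--     authors = dict.fromkeys(a for a, _ in pairs)
--     return {a: [t for x, t in pairs if x == a] for a in authors}
-- ===== Notes on version B (the rewrite author's own statement) =====
-- stated objective: alternative
-- what changed: A groups in a single pass by mutating a dict with setdefault/append; B first extracts the filtered (author, text) pair list, then builds the result by mapping over the distinct authors (first-appearance order) and gathering each author's texts from the pair list.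
import Mathlib
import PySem

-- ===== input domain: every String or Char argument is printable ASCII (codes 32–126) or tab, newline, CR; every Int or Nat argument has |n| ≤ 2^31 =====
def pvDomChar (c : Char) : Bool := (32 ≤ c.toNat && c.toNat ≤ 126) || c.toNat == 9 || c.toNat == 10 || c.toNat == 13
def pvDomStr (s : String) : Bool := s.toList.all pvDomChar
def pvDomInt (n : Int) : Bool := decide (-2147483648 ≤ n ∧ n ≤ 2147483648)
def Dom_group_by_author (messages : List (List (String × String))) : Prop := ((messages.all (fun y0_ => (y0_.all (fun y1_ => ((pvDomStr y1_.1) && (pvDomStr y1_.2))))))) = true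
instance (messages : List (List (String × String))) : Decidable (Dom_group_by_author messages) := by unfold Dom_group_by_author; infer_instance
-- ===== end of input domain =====

-- B replaces A's incremental dict mutation by a pair-extraction pass followed by a
-- per-distinct-author gather (alternative decomposition, same results).


-- ===== PORT A =====
-- m.get(k, dflt) on a str→str dict (first-match lookup per the assoc-list convention)
def pvGetD (m : List (String × String)) (k dflt : String) : String :=
  (PySem.Dict.mk m).getD k dflt

def group_by_author (messages : List (List (String × String))) : List (String × List String) :=
  (messages.foldl (fun (out : PySem.Dict String (List String)) m =>
      let a := pvGetD m "author" "unknown"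
      let t := PySem.Str.strip (pvGetD m "text" "")
      if t = "" then out                      -- 'if not t: continue'
      else out.modify a [] (· ++ [t]))        -- out.setdefault(a, []).append(t)
    PySem.Dict.empty).items

-- ===== PORT B =====
-- entry(m) = (author, stripped text)
def pvEntry (m : List (String × String)) : String × String :=
  (pvGetD m "author" "unknown", PySem.Str.strip (pvGetD m "text" ""))

def group_by_author_alt (messages : List (List (String × String))) : List (String × List String) :=
  let pairs := (messages.map pvEntry).filter (fun p => !(p.2 == ""))
  let authors := PySem.List.dedup (pairs.map (·.1))
  authors.map (fun a => (a, (pairs.filter (fun x => x.1 == a)).map (·.2)))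

-- ===== PRECONDITION & SPEC =====
def Spec_group_by_author (messages : List (List (String × String))) (out : List (String × List String)) : Prop := out = group_by_author_alt messages
instance (messages : List (List (String × String))) (out : List (String × List String)) : Decidable (Spec_group_by_author messages out) := by unfold Spec_group_by_author; infer_instance

-- ===== CLAIM (what is proved, stated in full; the proofs are below) =====
def Claim_equal_group_by_author : Prop := ∀ (messages : List (List (String × String))), Dom_group_by_author messages → Spec_group_by_author messages (group_by_author messages)

-- ===== LEMMAS AND PROOFS =====

-- A's message loop is the pair-grouping loop over B's filtered pair list.
theorem fold_msgs_eq_fold_pairs (msgs : List (List (String × String)))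
    (d : PySem.Dict String (List String)) :
    msgs.foldl (fun out m =>
      let a := pvGetD m "author" "unknown"
      let t := PySem.Str.strip (pvGetD m "text" "")
      if t = "" then out else out.modify a [] (· ++ [t])) d
    = ((msgs.map pvEntry).filter (fun p => !(p.2 == ""))).foldl
        (fun d p => d.modify p.1 [] (· ++ [p.2])) d := by
  induction msgs generalizing d with
  | nil => rfl
  | cons m rest ih =>
    simp only [List.map_cons, List.filter_cons, List.foldl_cons, pvEntry]
    by_cases h : PySem.Str.strip (pvGetD m "text" "") = ""
    · simp [h, ih]
    · simp [h, ih]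

theorem group_by_author_spec_aux (messages : List (List (String × String))) :
    group_by_author messages = group_by_author_alt messages := by
  unfold group_by_author group_by_author_alt
  rw [fold_msgs_eq_fold_pairs]
  set ps := (messages.map pvEntry).filter (fun p => !(p.2 == "")) with hps
  have hnd : (ps.foldl (fun d p => d.modify p.1 [] (· ++ [p.2])) PySem.Dict.empty).keys.Nodup := by
    exact PySem.Dict.nodup_keys_foldl_modify_key ps Prod.fst [] (fun _ p => (· ++ [p.2])) _
      PySem.Dict.nodup_keys_empty
  rw [PySem.Dict.items_eq_map_keys _ hnd []]
  have hkeys : (ps.foldl (fun d p => d.modify p.1 [] (· ++ [p.2])) PySem.Dict.empty).keys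
      = PySem.List.dedup (ps.map (·.1)) := by
    rw [PySem.Dict.keys_foldl_modify_key ps Prod.fst [] (fun _ p => (· ++ [p.2]))]
    simp [PySem.Dict.keys_empty, PySem.Set.update_nil_left]
  rw [hkeys]
  apply List.map_congr_left
  intro a _
  rw [PySem.Dict.getD_foldl_modify_append]
  simp [PySem.Dict.getD_empty]

-- ===== VERDICT (by name: the statement is the Claim_ definition above) =====
theorem group_by_author_spec : Claim_equal_group_by_author := by
  intro messages _
  unfold Spec_group_by_author
  exact group_by_author_spec_aux messages
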